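-- pv_equiv track=rewrite | github.com/100475757/EDA | Apuntes EDA/EDA_Clase_17.py | findLowestEvenOdd
-- ===== SOURCE A (Python) =====
-- def findLowestEvenOdd(A: list):
--     #Casos base
--     if A == None or len(A) == 0:
--         return None
--
--     if len(A) == 1:
--         if A[0] % 2 == 0:
--             return A[0] , None
--         else:
--             return None, A[0]
--
--
--     m = len(A) // 2
--     p1 = A[0:m]
--     p2 = A[m:]
--
--     minEven1,minOdd1= findLowestEvenOdd(p1)
--     minEven2,minOdd2=findLowestEvenOdd(p2)
--
--     if minEven1!=None and minEven2!=None: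
--         minEven=min(minEven1,minEven2)
--     elif minEven1==None and minEven2!=None:
--         minEven=minEven2
--     elif minEven2==None and minEven1!=None:
--         minEven=minEven1
--     else: #los dos son None
--         minEven=None
--
--     if minOdd1!=None and minOdd2!=None:
--         minOdd=min(minOdd1,minOdd2)
--     elif minOdd1==None and minOdd2!=None:
--         minOdd=minOdd2
--     elif minOdd2==None and minOdd1!=None:
--         minOdd=minOdd1
--     else: #los dos son None
--         minOdd=None
--
--
--     return minEven, minOdd
-- ===== SOURCE B (Python) =====
-- def findLowestEvenOdd(A: list):
--     # One linear pass with two running minima instead of recursive halving+merge.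
--     if A == None or len(A) == 0:
--         return None
--     minEven = None
--     minOdd = None
--     for x in A:
--         if x % 2 == 0:
--             if minEven is None or x < minEven:
--                 minEven = x
--         else:
--             if minOdd is None or x < minOdd:
--                 minOdd = x
--     return minEven, minOdd
-- ===== Notes on version B (the rewrite author's own statement) =====
-- stated objective: simpler
-- what changed: Replaced the recursive divide-and-conquer with slice copies and an eight-branch None-merging chain by a single left-to-right pass keeping two running minima.
import Mathlib
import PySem

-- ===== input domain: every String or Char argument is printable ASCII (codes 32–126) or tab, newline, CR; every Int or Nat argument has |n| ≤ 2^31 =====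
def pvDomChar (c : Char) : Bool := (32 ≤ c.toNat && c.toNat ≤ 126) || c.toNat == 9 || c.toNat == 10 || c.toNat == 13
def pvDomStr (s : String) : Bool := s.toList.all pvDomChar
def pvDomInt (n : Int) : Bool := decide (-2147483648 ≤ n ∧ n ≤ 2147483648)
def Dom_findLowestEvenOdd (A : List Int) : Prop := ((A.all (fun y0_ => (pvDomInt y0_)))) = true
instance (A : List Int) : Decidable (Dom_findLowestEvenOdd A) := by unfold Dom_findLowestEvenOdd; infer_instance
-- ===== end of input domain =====

-- B replaces A's recursive halving + eight-branch None-merge by one linear pass with two running minima (simpler).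


-- ===== PORT A =====
-- A-side helper: the if-elif-elif-else chain A applies to (minEven1,minEven2) and to (minOdd1,minOdd2)
def pyMergeMin (o1 o2 : Option Int) : Option Int :=
  match o1, o2 with
  | some a, some b => some (min a b)   -- both != None -> min
  | none,   some b => some b
  | some a, none   => some a
  | none,   none   => none

-- termination helper: len(A)//2 as a Nat cast
theorem pvFloordivTwo (n : Nat) : PySem.Int.floordiv (n : Int) 2 = ((n / 2 : Nat) : Int) := by
  simpa using PySem.Int.floordiv_natCast n 2

def findLowestEvenOdd (A : List Int) : Option (Option Int × Option Int) :=
  if _h0 : A.length = 0 then none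
  else if _h1 : A.length = 1 then
    match A with
    | [] => none            -- unreachable: length = 1
    | x :: _ =>             -- A[0]
      if PySem.Int.mod x 2 = 0 then some (some x, none) else some (none, some x)
  else
    let m : Int := PySem.Int.floordiv (A.length : Int) 2
    let p1 := PySem.List.slice A (some 0) (some m)
    let p2 := PySem.List.slice A (some m) none
    let r1 := (findLowestEvenOdd p1).getD (none, none)   -- tuple unpacking; the recursive result is never None here
    let r2 := (findLowestEvenOdd p2).getD (none, none)
    some (pyMergeMin r1.1 r2.1, pyMergeMin r1.2 r2.2)
termination_by A.length
decreasing_by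
  · simp only [PySem.List.slice_zero_start, pvFloordivTwo]
    rw [PySem.List.slice_to A (by positivity)]
    simp only [List.length_take, Int.toNat_natCast]
    omega
  · simp only [pvFloordivTwo]
    rw [PySem.List.slice_from A (by positivity)]
    simp only [List.length_drop, Int.toNat_natCast]
    omega

-- ===== PORT B =====
-- B-side helper: one iteration of B's loop body
def pyStepB (s : Option Int × Option Int) (x : Int) : Option Int × Option Int :=
  if PySem.Int.mod x 2 = 0 then
    (match s.1 with
     | none => some x
     | some v => if x < v then some x else some v, s.2)
  else
    (s.1,
     match s.2 with
     | none => some x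
     | some v => if x < v then some x else some v)

def findLowestEvenOdd_alt (A : List Int) : Option (Option Int × Option Int) :=
  if A.length = 0 then none
  else some (A.foldl pyStepB (none, none))

-- ===== PRECONDITION & SPEC =====
def Spec_findLowestEvenOdd (A : List Int) (out : Option (Option Int × Option Int)) : Prop := out = findLowestEvenOdd_alt A
instance (A : List Int) (out : Option (Option Int × Option Int)) : Decidable (Spec_findLowestEvenOdd A out) := by unfold Spec_findLowestEvenOdd; infer_instance

-- ===== CLAIM (what is proved, stated in full; the proofs are below) =====
def Claim_equal_findLowestEvenOdd : Prop := ∀ (A : List Int), Dom_findLowestEvenOdd A → Spec_findLowestEvenOdd A (findLowestEvenOdd A)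

-- ===== LEMMAS AND PROOFS =====

-- componentwise merge of two loop states
def mergeP (s t : Option Int × Option Int) : Option Int × Option Int :=
  (pyMergeMin s.1 t.1, pyMergeMin s.2 t.2)

theorem pyMergeMin_none_right (o : Option Int) : pyMergeMin o none = o := by
  cases o <;> rfl

theorem pyMergeMin_assoc (a b c : Option Int) :
    pyMergeMin (pyMergeMin a b) c = pyMergeMin a (pyMergeMin b c) := by
  cases a <;> cases b <;> cases c <;> simp [pyMergeMin, min_assoc]

theorem mergeP_none_right (s : Option Int × Option Int) : mergeP s (none, none) = s := by
  cases s with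
  | mk a b => simp [mergeP, pyMergeMin_none_right]

theorem mergeP_assoc (s t u : Option Int × Option Int) :
    mergeP (mergeP s t) u = mergeP s (mergeP t u) := by
  simp [mergeP, pyMergeMin_assoc]

-- one loop step from a merged state = merge with the step applied to the right state
theorem step_eq_merge (s : Option Int × Option Int) (x : Int) :
    pyStepB s x = mergeP s (pyStepB (none, none) x) := by
  obtain ⟨a, b⟩ := s
  by_cases h : PySem.Int.mod x 2 = 0 <;>
    cases a <;> cases b <;>
      simp only [pyStepB, mergeP, pyMergeMin, if_pos, h] <;>
      split_ifs <;> simp [min_def] <;> omega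

-- folding from any start state = merge of the start with the fold from scratch
theorem foldl_step_merge (l : List Int) :
    ∀ s : Option Int × Option Int,
      l.foldl pyStepB s = mergeP s (l.foldl pyStepB (none, none)) := by
  induction l with
  | nil => intro s; simp [mergeP_none_right]
  | cons x l ih =>
    intro s
    simp only [List.foldl_cons]
    rw [ih (pyStepB s x), ih (pyStepB (none, none) x),
        step_eq_merge s x, mergeP_assoc]

theorem foldl_append_merge (l1 l2 : List Int) :
    (l1 ++ l2).foldl pyStepB (none, none)
      = mergeP (l1.foldl pyStepB (none, none)) (l2.foldl pyStepB (none, none)) := by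
  rw [List.foldl_append, foldl_step_merge]

theorem findLowestEvenOdd_eq_fold :
    ∀ (n : Nat) (A : List Int), A.length ≤ n → A ≠ [] →
      findLowestEvenOdd A = some (A.foldl pyStepB (none, none)) := by
  intro n
  induction n with
  | zero =>
    intro A hlen hne
    exact absurd (List.eq_nil_of_length_eq_zero (by omega)) hne
  | succ n ih =>
    intro A hlen hne
    by_cases h0 : A.length = 0
    · exact absurd (List.eq_nil_of_length_eq_zero h0) hne
    by_cases h1 : A.length = 1
    · obtain ⟨x, rfl⟩ := List.length_eq_one_iff.mp h1
      rw [findLowestEvenOdd]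
      simp [pyStepB]
      split_ifs <;> simp
    · rw [findLowestEvenOdd]
      simp only [dif_neg h0, dif_neg h1, PySem.List.slice_zero_start, pvFloordivTwo]
      rw [PySem.List.slice_to A (by positivity), PySem.List.slice_from A (by positivity)]
      simp only [Int.toNat_natCast]
      have hlen2 : 2 ≤ A.length := by omega
      have hne1 : A.take (A.length / 2) ≠ [] := by
        intro h
        have h' : (A.take (A.length / 2)).length = 0 := by rw [h]; rfl
        rw [List.length_take] at h'; omega
      have hne2 : A.drop (A.length / 2) ≠ [] := by
        intro h
        have h' : (A.drop (A.length / 2)).length = 0 := by rw [h]; rfl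
        rw [List.length_drop] at h'; omega
      rw [ih (A.take (A.length / 2)) (by rw [List.length_take]; omega) hne1,
          ih (A.drop (A.length / 2)) (by rw [List.length_drop]; omega) hne2]
      conv_rhs => rw [← List.take_append_drop (A.length / 2) A]
      rw [foldl_append_merge]
      rfl

-- ===== VERDICT (by name: the statement is the Claim_ definition above) =====
theorem findLowestEvenOdd_spec : Claim_equal_findLowestEvenOdd := by
  intro A _
  unfold Spec_findLowestEvenOdd findLowestEvenOdd_alt
  by_cases h : A = []
  · subst h; rw [findLowestEvenOdd]; simp
  · rw [findLowestEvenOdd_eq_fold A.length A le_rfl h]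
    simp [List.length_eq_zero_iff, h]
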